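-- pv_equiv track=rewrite | github.com/eliottcassidy2000/math | 04-computation/beta2_flip_obstruction_proof.py | get_3cycles
-- ===== SOURCE A (Python) =====
-- def get_3cycles(A, n):
--     """Return list of directed 3-cycles as (a,b,c) where a->b->c->a."""
--     cycles = []
--     for i in range(n):
--         for j in range(n):
--             if j == i: continue
--             if not A[i][j]: continue
--             for k in range(n):
--                 if k == i or k == j: continue
--                 if A[j][k] and A[k][i]:
--                     cycles.append((i,j,k))
--     return cycles
-- ===== SOURCE B (Python) =====
-- def get_3cycles(A, n):
--     """Return list of directed 3-cycles as (a,b,c) where a->b->c->a."""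
--     succ = [[v for v in range(n) if v != u and A[u][v]] for u in range(n)]
--     E = [(u, v) for u in range(n) for v in succ[u]]
--     Eset = set(E)
--     return [(i, j, k) for (i, j) in E for k in succ[j] if k != i and (k, i) in Eset]
-- ===== Notes on version B (the rewrite author's own statement) =====
-- stated objective: alternative
-- what changed: B replaces A's triple nested index scan over the matrix by first materialising the successor lists and the directed edge relation, then producing the cycles with a single join pass over the edge list (closing each path i->j->k through an edge set), instead of re-testing matrix entries in three nested index loops.
import Mathlib
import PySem

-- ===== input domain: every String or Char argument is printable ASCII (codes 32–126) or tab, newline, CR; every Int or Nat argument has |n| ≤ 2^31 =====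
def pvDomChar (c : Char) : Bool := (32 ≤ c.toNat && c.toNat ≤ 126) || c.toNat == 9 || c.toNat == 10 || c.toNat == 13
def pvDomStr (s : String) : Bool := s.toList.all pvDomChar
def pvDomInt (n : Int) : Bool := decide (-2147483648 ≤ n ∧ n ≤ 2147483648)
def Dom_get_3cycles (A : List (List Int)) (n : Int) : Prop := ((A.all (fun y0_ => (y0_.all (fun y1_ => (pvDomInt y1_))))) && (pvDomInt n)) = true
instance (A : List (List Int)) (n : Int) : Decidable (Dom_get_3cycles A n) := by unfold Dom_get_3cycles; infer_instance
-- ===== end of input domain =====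

-- B re-implements the triple nested index scan as an edge-relation self-join: it builds the
-- directed edge list once and joins it with itself (closing cycles through an edge set);
-- objective: alternative decomposition, equal return value.

-- ===== PORT A =====
def get_3cycles (A : List (List Int)) (n : Int) : List (Int × Int × Int) :=
  (PySem.List.pyRange 0 n 1).foldl (fun cycles i =>
    (PySem.List.pyRange 0 n 1).foldl (fun cycles j =>
      if j = i then cycles
      else if PySem.List.pyGetD (PySem.List.pyGetD A i []) j 0 = 0 then cycles
      else (PySem.List.pyRange 0 n 1).foldl (fun cycles k =>
        if k = i ∨ k = j then cycles
        else if PySem.List.pyGetD (PySem.List.pyGetD A j []) k 0 ≠ 0 ∧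
                PySem.List.pyGetD (PySem.List.pyGetD A k []) i 0 ≠ 0 then
          cycles ++ [(i, j, k)]
        else cycles) cycles) cycles) []

-- ===== PORT B =====
def get_3cycles_alt (A : List (List Int)) (n : Int) : List (Int × Int × Int) :=
  let succ : List (List Int) :=
    (PySem.List.pyRange 0 n 1).map (fun u =>
      (PySem.List.pyRange 0 n 1).filter (fun v =>
        decide (u ≠ v) && decide (PySem.List.pyGetD (PySem.List.pyGetD A u []) v 0 ≠ 0)))
  let E : List (Int × Int) :=
    (PySem.List.pyRange 0 n 1).flatMap (fun u =>
      (PySem.List.pyGetD succ u []).map (fun v => (u, v)))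
  let Eset : PySem.Set (Int × Int) := PySem.Set.ofList E
  E.flatMap (fun p =>
    (PySem.List.pyGetD succ p.2 []).filterMap (fun k =>
      if k ≠ p.1 ∧ (k, p.1) ∈ Eset then some (p.1, p.2, k) else none))

-- ===== PRECONDITION & SPEC =====
-- Pre_ excludes exactly the inputs on which A raises IndexError: for n >= 2 the scan
-- unconditionally reads A[i][j] for all i,j < n with j != i (and reads nothing beyond them),
-- so A returns iff there are n rows and row i has at least n entries (n-1 for the last row).
def Pre_get_3cycles (A : List (List Int)) (n : Int) : Prop :=
  2 ≤ n → (n ≤ A.length ∧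
    ∀ p ∈ (A.take n.toNat).zipIdx, (if (p.2 : Int) = n - 1 then n - 1 else n) ≤ (p.1.length : Int))
instance (A : List (List Int)) (n : Int) : Decidable (Pre_get_3cycles A n) := by
  unfold Pre_get_3cycles; infer_instance
def pvWitness_get_3cycles : List (List Int) × Int := ([[0, 1, 0], [0, 0, 1], [1, 0, 0]], 3)

def Spec_get_3cycles (A : List (List Int)) (n : Int) (out : List (Int × Int × Int)) : Prop := out = get_3cycles_alt A n
instance (A : List (List Int)) (n : Int) (out : List (Int × Int × Int)) : Decidable (Spec_get_3cycles A n out) := by unfold Spec_get_3cycles; infer_instance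

-- ===== CLAIM (what is proved, stated in full; the proofs are below) =====
def Claim_equal_get_3cycles : Prop := ∀ (A : List (List Int)) (n : Int), Dom_get_3cycles A n → Pre_get_3cycles A n → Spec_get_3cycles A n (get_3cycles A n)

-- ===== LEMMAS AND PROOFS =====
-- (In fact the two ports agree on ALL inputs, since the total pyGetD primitives make both
-- ports read the same defaulted entry function; the proof below does not need Pre_, which is
-- there solely because the Python A raises outside it.)

-- the edge predicate of B ('u != v and A[u][v]')
def pvPe (e : Int → Int → Int) (u v : Int) : Bool := decide (u ≠ v) && decide (e u v ≠ 0)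

-- B's edge list, as a function of the entry function e
def pvEdges (e : Int → Int → Int) (n : Int) : List (Int × Int) :=
  (PySem.List.pyRange 0 n 1).flatMap (fun u =>
    ((PySem.List.pyRange 0 n 1).filter (pvPe e u)).map (fun v => (u, v)))

-- the common canonical form (A's shape)
def pvCanon (e : Int → Int → Int) (n : Int) : List (Int × Int × Int) :=
  (PySem.List.pyRange 0 n 1).flatMap (fun i =>
    ((PySem.List.pyRange 0 n 1).filter (pvPe e i)).flatMap (fun j =>
      ((PySem.List.pyRange 0 n 1).filter (fun k =>
        decide (¬(k = i ∨ k = j) ∧ (e j k ≠ 0 ∧ e k i ≠ 0)))).map (fun k => (i, j, k))))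

-- general list lemmas not found in Mathlib/PySem
theorem pvFilter_map_eq_filterMap {α β : Type} (l : List α) (p : α → Bool) (f : α → β) :
    (l.filter p).map f = l.filterMap (fun x => if p x then some (f x) else none) := by
  induction l with
  | nil => rfl
  | cons a t ih =>
    by_cases h : p a <;> simp [h, ih]

theorem pvFlatMap_map {α β γ : Type} (l : List α) (f : α → β) (F : β → List γ) :
    (l.map f).flatMap F = l.flatMap (fun x => F (f x)) := by
  induction l with
  | nil => rfl
  | cons a t ih => simp [ih]

theorem pvFlatMap_guard {α β : Type} (l : List α) (p : α → Bool) (F : α → List β) :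
    l.flatMap (fun x => if p x then F x else []) = (l.filter p).flatMap F := by
  induction l with
  | nil => rfl
  | cons a t ih => by_cases h : p a <;> simp [h, ih]

-- membership in B's edge list
theorem pvMem_edges (e : Int → Int → Int) (n x y : Int) :
    (x, y) ∈ pvEdges e n ↔ (0 ≤ x ∧ x < n ∧ 0 ≤ y ∧ y < n ∧ x ≠ y ∧ e x y ≠ 0) := by
  simp only [pvEdges, List.mem_flatMap, List.mem_map, List.mem_filter,
    PySem.List.mem_pyRange_one, pvPe, Bool.and_eq_true, decide_eq_true_eq, Prod.mk.injEq]
  constructor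
  · rintro ⟨u, hu, v, ⟨⟨hv, huv, he⟩, rfl, rfl⟩⟩
    exact ⟨hu.1, hu.2, hv.1, hv.2, huv, he⟩
  · rintro ⟨hx0, hx1, hy0, hy1, hxy, he⟩
    exact ⟨x, ⟨hx0, hx1⟩, y, ⟨⟨⟨hy0, hy1⟩, hxy, he⟩, rfl, rfl⟩⟩

-- ---- A-side: the triple foldl reduces to the canonical form ----
theorem pvA_inner (e : Int → Int → Int) (n i j : Int) (acc : List (Int × Int × Int)) :
    (PySem.List.pyRange 0 n 1).foldl (fun cycles k =>
        if k = i ∨ k = j then cycles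
        else if e j k ≠ 0 ∧ e k i ≠ 0 then cycles ++ [(i, j, k)] else cycles) acc
    = acc ++ ((PySem.List.pyRange 0 n 1).filter (fun k =>
        decide (¬(k = i ∨ k = j) ∧ (e j k ≠ 0 ∧ e k i ≠ 0)))).map (fun k => (i, j, k)) := by
  have h : ∀ (c : List (Int × Int × Int)) (k : Int), k ∈ PySem.List.pyRange 0 n 1 →
      (if k = i ∨ k = j then c
       else if e j k ≠ 0 ∧ e k i ≠ 0 then c ++ [(i, j, k)] else c)
      = (if (¬(k = i ∨ k = j) ∧ (e j k ≠ 0 ∧ e k i ≠ 0)) then c ++ [(i, j, k)] else c) := by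
    intro c k _
    split_ifs <;> tauto
  exact Eq.trans (PySem.List.foldl_congr_mem _ _ _ _ h) (PySem.List.foldl_append_ite _ _ _ _)

theorem pvA_mid (e : Int → Int → Int) (n i : Int) (acc : List (Int × Int × Int)) :
    (PySem.List.pyRange 0 n 1).foldl (fun cycles j =>
      if j = i then cycles
      else if e i j = 0 then cycles
      else (PySem.List.pyRange 0 n 1).foldl (fun cycles k =>
        if k = i ∨ k = j then cycles
        else if e j k ≠ 0 ∧ e k i ≠ 0 then cycles ++ [(i, j, k)] else cycles) cycles) acc
    = acc ++ ((PySem.List.pyRange 0 n 1).filter (pvPe e i)).flatMap (fun j =>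
        ((PySem.List.pyRange 0 n 1).filter (fun k =>
          decide (¬(k = i ∨ k = j) ∧ (e j k ≠ 0 ∧ e k i ≠ 0)))).map (fun k => (i, j, k))) := by
  have h : ∀ (c : List (Int × Int × Int)) (j : Int), j ∈ PySem.List.pyRange 0 n 1 →
      (if j = i then c
       else if e i j = 0 then c
       else (PySem.List.pyRange 0 n 1).foldl (fun cycles k =>
         if k = i ∨ k = j then cycles
         else if e j k ≠ 0 ∧ e k i ≠ 0 then cycles ++ [(i, j, k)] else cycles) c)
      = c ++ (if pvPe e i j then
          ((PySem.List.pyRange 0 n 1).filter (fun k =>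
            decide (¬(k = i ∨ k = j) ∧ (e j k ≠ 0 ∧ e k i ≠ 0)))).map (fun k => (i, j, k))
        else []) := by
    intro c j _
    by_cases h1 : j = i
    · subst h1
      simp [pvPe]
    · by_cases h2 : e i j = 0
      · have : pvPe e i j = false := by simp [pvPe, h2]
        simp [h1, h2, this]
      · have : pvPe e i j = true := by
          simp only [pvPe, Bool.and_eq_true, decide_eq_true_eq]
          exact ⟨fun h => h1 h.symm, h2⟩
        rw [if_neg h1, if_neg h2, pvA_inner, this, if_pos rfl]
  refine Eq.trans (PySem.List.foldl_congr_mem _ _ _ _ h) ?_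
  rw [PySem.List.foldl_append_eq_flatMap, pvFlatMap_guard]

theorem pvA_eq (e : Int → Int → Int) (n : Int) :
    (PySem.List.pyRange 0 n 1).foldl (fun cycles i =>
      (PySem.List.pyRange 0 n 1).foldl (fun cycles j =>
        if j = i then cycles
        else if e i j = 0 then cycles
        else (PySem.List.pyRange 0 n 1).foldl (fun cycles k =>
          if k = i ∨ k = j then cycles
          else if e j k ≠ 0 ∧ e k i ≠ 0 then cycles ++ [(i, j, k)] else cycles) cycles) cycles) []
    = pvCanon e n := by
  have h : ∀ (c : List (Int × Int × Int)) (i : Int), i ∈ PySem.List.pyRange 0 n 1 →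
      ((PySem.List.pyRange 0 n 1).foldl (fun cycles j =>
        if j = i then cycles
        else if e i j = 0 then cycles
        else (PySem.List.pyRange 0 n 1).foldl (fun cycles k =>
          if k = i ∨ k = j then cycles
          else if e j k ≠ 0 ∧ e k i ≠ 0 then cycles ++ [(i, j, k)] else cycles) cycles) c)
      = c ++ ((PySem.List.pyRange 0 n 1).filter (pvPe e i)).flatMap (fun j =>
          ((PySem.List.pyRange 0 n 1).filter (fun k =>
            decide (¬(k = i ∨ k = j) ∧ (e j k ≠ 0 ∧ e k i ≠ 0)))).map (fun k => (i, j, k))) := by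
    intro c i _
    exact pvA_mid e n i c
  refine Eq.trans (PySem.List.foldl_congr_mem _ _ _ _ h) ?_
  rw [PySem.List.foldl_append_eq_flatMap, List.nil_append]
  rfl

-- ---- B-side: the succ-indexed edge-relation join reduces to the canonical form ----
theorem pvB_inner (e : Int → Int → Int) (n i j : Int) (S : List (Int × Int))
    (hS : ∀ z : Int × Int, z ∈ S ↔ z ∈ pvEdges e n)
    (hi0 : 0 ≤ i) (hi1 : i < n) :
    ((PySem.List.pyRange 0 n 1).filter (pvPe e j)).filterMap (fun k =>
      if k ≠ i ∧ (k, i) ∈ S then some (i, j, k) else none)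
    = ((PySem.List.pyRange 0 n 1).filter (fun k =>
        decide (¬(k = i ∨ k = j) ∧ (e j k ≠ 0 ∧ e k i ≠ 0)))).map (fun k => (i, j, k)) := by
  rw [List.filterMap_filter, pvFilter_map_eq_filterMap]
  apply List.filterMap_congr
  intro k hk
  have hk' : 0 ≤ k ∧ k < n := (PySem.List.mem_pyRange_one).mp hk
  have hset : ((k, i) ∈ S) ↔ (0 ≤ k ∧ k < n ∧ 0 ≤ i ∧ i < n ∧ k ≠ i ∧ e k i ≠ 0) :=
    (hS _).trans (pvMem_edges e n k i)
  simp only [pvPe, Bool.and_eq_true, decide_eq_true_eq, hset]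
  split_ifs <;> first
    | rfl
    | (exfalso; tauto)

theorem pvB_eq (e : Int → Int → Int) (n : Int) :
    ((PySem.List.pyRange 0 n 1).flatMap (fun u =>
      (PySem.List.pyGetD ((PySem.List.pyRange 0 n 1).map (fun u =>
        (PySem.List.pyRange 0 n 1).filter (pvPe e u))) u []).map (fun v => (u, v)))).flatMap
      (fun p =>
        (PySem.List.pyGetD ((PySem.List.pyRange 0 n 1).map (fun u =>
          (PySem.List.pyRange 0 n 1).filter (pvPe e u))) p.2 []).filterMap (fun k =>
          if k ≠ p.1 ∧ (k, p.1) ∈ PySem.Set.ofList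
              ((PySem.List.pyRange 0 n 1).flatMap (fun u =>
                (PySem.List.pyGetD ((PySem.List.pyRange 0 n 1).map (fun u =>
                  (PySem.List.pyRange 0 n 1).filter (pvPe e u))) u []).map (fun v => (u, v)))) then
            some (p.1, p.2, k) else none))
    = pvCanon e n := by
  have hsucc : ∀ u : Int, 0 ≤ u → u < n →
      PySem.List.pyGetD ((PySem.List.pyRange 0 n 1).map (fun u =>
        (PySem.List.pyRange 0 n 1).filter (pvPe e u))) u []
      = (PySem.List.pyRange 0 n 1).filter (pvPe e u) := by
    intro u h0 h1
    exact PySem.List.pyGetD_map_pyRange_of_nonneg _ _ _ _ h0 h1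
  have hE : (PySem.List.pyRange 0 n 1).flatMap (fun u =>
      (PySem.List.pyGetD ((PySem.List.pyRange 0 n 1).map (fun u =>
        (PySem.List.pyRange 0 n 1).filter (pvPe e u))) u []).map (fun v => (u, v)))
      = pvEdges e n := by
    rw [pvEdges]
    apply List.flatMap_congr
    intro u hu
    have hu' : 0 ≤ u ∧ u < n := (PySem.List.mem_pyRange_one).mp hu
    rw [hsucc u hu'.1 hu'.2]
  rw [hE]
  have hout : ∀ (F : Int × Int → List (Int × Int × Int)),
      (pvEdges e n).flatMap F
      = (PySem.List.pyRange 0 n 1).flatMap (fun i =>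
          ((PySem.List.pyRange 0 n 1).filter (pvPe e i)).flatMap (fun j => F (i, j))) := by
    intro F
    rw [pvEdges, List.flatMap_assoc]
    apply List.flatMap_congr
    intro u _
    exact pvFlatMap_map _ _ _
  rw [hout, pvCanon]
  apply List.flatMap_congr
  intro i hi
  apply List.flatMap_congr
  intro j hj
  have hi' : 0 ≤ i ∧ i < n := (PySem.List.mem_pyRange_one).mp hi
  have hj' : 0 ≤ j ∧ j < n :=
    (PySem.List.mem_pyRange_one).mp (List.mem_of_mem_filter hj)
  rw [hsucc j hj'.1 hj'.2]
  exact pvB_inner e n i j _ (fun z => PySem.Set.mem_ofList _ z) hi'.1 hi'.2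

theorem pvMain (A : List (List Int)) (n : Int) :
    get_3cycles A n = get_3cycles_alt A n := by
  have hA : get_3cycles A n
      = pvCanon (fun u v => PySem.List.pyGetD (PySem.List.pyGetD A u []) v 0) n :=
    pvA_eq _ n
  have hB : get_3cycles_alt A n
      = pvCanon (fun u v => PySem.List.pyGetD (PySem.List.pyGetD A u []) v 0) n :=
    pvB_eq _ n
  rw [hA, hB]

-- ===== VERDICT (by name: the statement is the Claim_ definition above) =====
theorem get_3cycles_spec : Claim_equal_get_3cycles := by
  intro A n _ _
  exact pvMain A n
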